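-- pv_equiv track=rewrite | github.com/BertanUysalProjeler/MyProjects | Number Board Game/assignment3.py | evaluate_possibility
-- ===== SOURCE A (Python) =====
-- import copy
--
-- def dfs(grid, i, j, v, guess_value):
--     guess_value_copy = guess_value
--     grid_copy = grid
--
--     dirs = [[0, -1], [-1, 0], [0, 1], [1, 0]]
--
--     rows = len(grid_copy)
--     cols = len(grid_copy[0])
--
--     if i < 0 or i >= rows or j < 0 or j >= cols or grid_copy[i][j] != guess_value_copy or grid_copy[i][j] == '':
--         return v, grid, guess_value
--
--     grid_copy[i][j] = ''
--
--     v.append((i, j))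
--
--     for dir in dirs:
--         v, grid_copy, guess_value_copy = dfs(grid_copy, i + dir[0], j + dir[1], v, guess_value_copy)
--
--     if len(v) == 1:
--         # Restore the values back to the marked cell
--         i, j = v[0]
--         grid_copy[i][j] = guess_value
--
--     return v, grid_copy, guess_value_copy
--
-- def evaluate_possibility(grid):
--     possibility_count = 0
--     for i in range(len(grid)):
--         for j in range(len(grid[0])):
--             if grid[i][j] != '':
--                 v = []
--                 guess_value = grid[i][j]
--                 grid_copy = copy.deepcopy(grid)
--                 dfs(grid_copy, i, j, v, guess_value)
--                 if len(v) >= 2: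
--                     possibility_count += 1
--
--     return possibility_count
-- ===== SOURCE B (Python) =====
-- def evaluate_possibility(grid):
--     # A cell lies in a same-value 4-connected region of size >= 2
--     # iff it has at least one equal-valued 4-neighbour, so count those directly.
--     rows = len(grid)
--     cols = len(grid[0])
--     count = 0
--     for i in range(rows):
--         for j in range(cols):
--             val = grid[i][j]
--             if val == '':
--                 continue
--             if ((j > 0 and grid[i][j - 1] == val) or
--                     (i > 0 and grid[i - 1][j] == val) or
--                     (j + 1 < cols and grid[i][j + 1] == val) or
--                     (i + 1 < rows and grid[i + 1][j] == val)):
--                 count += 1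
--     return count
-- ===== Notes on version B (the rewrite author's own statement) =====
-- stated objective: faster
-- what changed: A re-runs a deep-copy plus recursive flood-fill DFS from every cell to test whether its region has >= 2 cells; B uses the fact that a cell's same-value region has size >= 2 iff the cell has an equal-valued 4-neighbour, and counts such cells in one loop-free-of-recursion pass.
-- outside the precondition, e.g. on evaluate_possibility([]): A returns 0, B raises IndexError
import Mathlib
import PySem

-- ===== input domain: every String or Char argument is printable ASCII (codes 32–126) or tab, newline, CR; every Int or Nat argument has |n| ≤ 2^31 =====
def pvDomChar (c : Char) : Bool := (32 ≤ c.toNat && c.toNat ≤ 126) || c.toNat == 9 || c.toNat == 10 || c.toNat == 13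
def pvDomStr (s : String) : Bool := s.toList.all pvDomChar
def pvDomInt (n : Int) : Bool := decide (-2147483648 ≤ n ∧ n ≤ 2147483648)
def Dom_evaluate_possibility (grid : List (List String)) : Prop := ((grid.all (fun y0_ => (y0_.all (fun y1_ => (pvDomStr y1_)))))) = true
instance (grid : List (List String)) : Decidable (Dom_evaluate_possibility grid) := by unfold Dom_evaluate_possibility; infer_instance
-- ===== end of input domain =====

-- B replaces A's per-cell deep-copy + recursive DFS with a single pass testing each
-- cell for an equal-valued 4-neighbour (equivalent to "its region has size ≥ 2"): faster.

-- grid[i][j] for in-range Nat indices (rows shorter than row 0 are outside Pre_)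
def pvVal (g : List (List String)) (i j : Nat) : String := (g.getD i []).getD j ""

-- ===== PORT A =====
-- fuel-indexed literal port of A's dfs; fuel rows*cols+2 exceeds the recursion depth
def dfsA : Nat → List (List String) → Int → Int → List (Int × Int) → String →
    List (Int × Int) × List (List String) × String
  | 0, g, _, _, v, gv => (v, g, gv)
  | fuel+1, g, i, j, v, gv =>
    let rows : Int := g.length
    let cols : Int := (g.getD 0 []).length
    if i < 0 ∨ rows ≤ i ∨ j < 0 ∨ cols ≤ j ∨ pvVal g i.toNat j.toNat ≠ gv ∨ pvVal g i.toNat j.toNat = "" then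
      (v, g, gv)
    else
      let g1 := g.set i.toNat ((g.getD i.toNat []).set j.toNat "")
      let v1 := v ++ [(i, j)]
      let r1 := dfsA fuel g1 i (j-1) v1 gv
      let r2 := dfsA fuel r1.2.1 (i-1) j r1.1 r1.2.2
      let r3 := dfsA fuel r2.2.1 i (j+1) r2.1 r2.2.2
      let r4 := dfsA fuel r3.2.1 (i+1) j r3.1 r3.2.2
      let g4 := if r4.1.length = 1 then
          (r4.2.1.set (r4.1.getD 0 (0,0)).1.toNat
            ((r4.2.1.getD (r4.1.getD 0 (0,0)).1.toNat []).set (r4.1.getD 0 (0,0)).2.toNat gv))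
        else r4.2.1
      (r4.1, g4, r4.2.2)

def evaluate_possibility (grid : List (List String)) : Int :=
  let rows := grid.length
  let cols := (grid.getD 0 []).length
  (List.range rows).foldl (fun acc i =>
    (List.range cols).foldl (fun acc j =>
      if pvVal grid i j ≠ "" then
        let r := dfsA (rows * cols + 2) grid (i : Int) (j : Int) [] (pvVal grid i j)
        if 2 ≤ r.1.length then acc + 1 else acc
      else acc) acc) 0

-- ===== PORT B =====
def evaluate_possibility_alt (grid : List (List String)) : Int :=
  let rows := grid.length
  let cols := (grid.getD 0 []).length
  (List.range rows).foldl (fun acc i =>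
    (List.range cols).foldl (fun acc j =>
      let val := pvVal grid i j
      if val = "" then acc
      else if (0 < j ∧ pvVal grid i (j-1) = val) ∨ (0 < i ∧ pvVal grid (i-1) j = val) ∨
              (j+1 < cols ∧ pvVal grid i (j+1) = val) ∨ (i+1 < rows ∧ pvVal grid (i+1) j = val)
        then acc + 1 else acc) acc) 0

-- ===== PRECONDITION & SPEC =====
-- Pre_ excludes grids with a row shorter than row 0, where Python A raises IndexError,
-- and the empty grid, a defensible corner where A's empty loop returns 0 before ever
-- touching grid[0] while B (like dfs itself would) indexes row 0 and raises.
def Pre_evaluate_possibility (grid : List (List String)) : Prop :=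
  grid ≠ [] ∧ ∀ row ∈ grid, (grid.getD 0 []).length ≤ row.length
instance (grid : List (List String)) : Decidable (Pre_evaluate_possibility grid) := by
  unfold Pre_evaluate_possibility; infer_instance
def pvWitness_evaluate_possibility : List (List String) := [["a", "a"], ["", "b"]]
def Spec_evaluate_possibility (grid : List (List String)) (out : Int) : Prop := out = evaluate_possibility_alt grid
instance (grid : List (List String)) (out : Int) : Decidable (Spec_evaluate_possibility grid out) := by unfold Spec_evaluate_possibility; infer_instance

-- ===== CLAIM (what is proved, stated in full; the proofs are below) =====
def Claim_equal_evaluate_possibility : Prop := ∀ (grid : List (List String)), Dom_evaluate_possibility grid → Pre_evaluate_possibility grid → Spec_evaluate_possibility grid (evaluate_possibility grid)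

-- ===== LEMMAS AND PROOFS =====

theorem getD_set_ne {α : Type} (l : List α) (m n : Nat) (x d : α) (h : m ≠ n) :
    (l.set m x).getD n d = l.getD n d := by
  simp [List.getD_eq_getElem?_getD, List.getElem?_set_ne h]

theorem getD_set_self {α : Type} (l : List α) (m : Nat) (x d : α) (h : m < l.length) :
    (l.set m x).getD m d = x := by
  simp [List.getD_eq_getElem?_getD, h]

-- a cell (a,b) ≠ (i,j) reads the same value after (i,j) is blanked
theorem pvVal_mark_ne (g : List (List String)) (i j a b : Nat) (h : a ≠ i ∨ b ≠ j) :
    pvVal (g.set i ((g.getD i []).set j "")) a b = pvVal g a b := by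
  unfold pvVal
  rcases h with h | h
  · rw [getD_set_ne _ _ _ _ _ (Ne.symm h)]
  · by_cases ha : a = i
    · subst ha
      by_cases hil : a < g.length
      · rw [getD_set_self _ _ _ _ hil, getD_set_ne _ _ _ _ _ (Ne.symm h)]
      · rw [List.set_eq_of_length_le (by omega)]
    · rw [getD_set_ne _ _ _ _ _ (Ne.symm ha)]

theorem cols_mark (g : List (List String)) (i j : Nat) (hi : i < g.length) :
    ((g.set i ((g.getD i []).set j "")).getD 0 []).length = (g.getD 0 []).length := by
  by_cases h0 : i = 0
  · subst h0; rw [getD_set_self _ _ _ _ hi]; exact List.length_set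
  · rw [getD_set_ne _ _ _ _ _ h0]

-- dfsA never shortens v
theorem dfsA_mono (fuel : Nat) (g : List (List String)) (i j : Int)
    (v : List (Int × Int)) (gv : String) :
    v.length ≤ (dfsA fuel g i j v gv).1.length := by
  induction fuel generalizing g i j v gv with
  | zero => simp [dfsA]
  | succ f ih =>
    rw [dfsA]
    split
    · simp
    · dsimp only
      refine le_trans ?_ (ih _ _ _ _ _)
      refine le_trans ?_ (ih _ _ _ _ _)
      refine le_trans ?_ (ih _ _ _ _ _)
      refine le_trans ?_ (ih _ _ _ _ _)
      simp

-- base case: the guard holds, nothing changes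
theorem dfsA_base (fuel : Nat) (g : List (List String)) (i j : Int)
    (v : List (Int × Int)) (gv : String)
    (h : i < 0 ∨ (g.length : Int) ≤ i ∨ j < 0 ∨ ((g.getD 0 []).length : Int) ≤ j ∨
         pvVal g i.toNat j.toNat ≠ gv ∨ pvVal g i.toNat j.toNat = "") :
    dfsA (fuel+1) g i j v gv = (v, g, gv) := by
  rw [dfsA]
  exact if_pos h

-- progress: the guard fails, v grows by at least one
theorem dfsA_progress (fuel : Nat) (g : List (List String)) (i j : Int)
    (v : List (Int × Int)) (gv : String)
    (h : ¬ (i < 0 ∨ (g.length : Int) ≤ i ∨ j < 0 ∨ ((g.getD 0 []).length : Int) ≤ j ∨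
         pvVal g i.toNat j.toNat ≠ gv ∨ pvVal g i.toNat j.toNat = "")) :
    v.length + 1 ≤ (dfsA (fuel+1) g i j v gv).1.length := by
  rw [dfsA, if_neg h]
  dsimp only
  refine le_trans ?_ (dfsA_mono fuel _ _ _ _ _)
  refine le_trans ?_ (dfsA_mono fuel _ _ _ _ _)
  refine le_trans ?_ (dfsA_mono fuel _ _ _ _ _)
  refine le_trans ?_ (dfsA_mono fuel _ _ _ _ _)
  simp

-- the key characterisation: the dfs from (i,j) collects ≥ 2 cells iff (i,j) has an
-- equal-valued in-bounds 4-neighbour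
theorem dfsA_ge_two_iff (fuel : Nat) (g : List (List String)) (i j : Nat)
    (hi : i < g.length) (hj : j < (g.getD 0 []).length)
    (hv : pvVal g i j ≠ "") :
    (2 ≤ (dfsA (fuel+2) g (i : Int) (j : Int) [] (pvVal g i j)).1.length) ↔
      ((0 < j ∧ pvVal g i (j-1) = pvVal g i j) ∨ (0 < i ∧ pvVal g (i-1) j = pvVal g i j) ∨
       (j+1 < (g.getD 0 []).length ∧ pvVal g i (j+1) = pvVal g i j) ∨
       (i+1 < g.length ∧ pvVal g (i+1) j = pvVal g i j)) := by
  rw [show fuel+2 = (fuel+1)+1 from rfl, dfsA]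
  rw [if_neg (by
    simp only [Int.toNat_natCast]
    push Not
    exact ⟨by omega, by omega, by omega, by omega, rfl, hv⟩)]
  dsimp only
  simp only [Int.toNat_natCast, List.nil_append]
  set G1 := g.set i ((g.getD i []).set j "") with hG1def
  have hg1len : G1.length = g.length := List.length_set
  have hcols1 : (G1.getD 0 []).length = (g.getD 0 []).length := cols_mark g i j hi
  have eI : ((i : Int)).toNat = i := by omega
  have eJ : ((j : Int)).toNat = j := by omega
  -- neighbour values in the marked grid equal those in g
  have hvL : 0 < j → pvVal G1 i (j-1) = pvVal g i (j-1) := fun h =>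
    pvVal_mark_ne g i j i (j-1) (Or.inr (by omega))
  have hvU : 0 < i → pvVal G1 (i-1) j = pvVal g (i-1) j := fun h =>
    pvVal_mark_ne g i j (i-1) j (Or.inl (by omega))
  have hvR : pvVal G1 i (j+1) = pvVal g i (j+1) :=
    pvVal_mark_ne g i j i (j+1) (Or.inr (by omega))
  have hvD : pvVal G1 (i+1) j = pvVal g (i+1) j :=
    pvVal_mark_ne g i j (i+1) j (Or.inl (by omega))
  by_cases c1 : 0 < j ∧ pvVal g i (j-1) = pvVal g i j
  · refine iff_of_true ?_ (Or.inl c1)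
    refine le_trans ?_ (dfsA_mono _ _ _ _ _ _)
    refine le_trans ?_ (dfsA_mono _ _ _ _ _ _)
    refine le_trans ?_ (dfsA_mono _ _ _ _ _ _)
    exact dfsA_progress fuel G1 i ((j : Int)-1) [((i : Int), (j : Int))] (pvVal g i j) (by
      push Not
      have e2 : ((j : Int)-1).toNat = j - 1 := by omega
      refine ⟨by omega, by omega, by omega, by omega, ?_, ?_⟩
      · rw [eI, e2, hvL c1.1]; exact c1.2
      · rw [eI, e2, hvL c1.1, c1.2]; exact hv)
  · have gl : ((i : Int)) < 0 ∨ ((G1.length : Nat) : Int) ≤ (i : Int) ∨ (j : Int) - 1 < 0 ∨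
        (((G1.getD 0 []).length : Nat) : Int) ≤ (j : Int) - 1 ∨
        pvVal G1 ((i : Int)).toNat ((j : Int) - 1).toNat ≠ pvVal g i j ∨
        pvVal G1 ((i : Int)).toNat ((j : Int) - 1).toNat = "" := by
      by_cases hj0 : j = 0
      · subst hj0; exact Or.inr (Or.inr (Or.inl (by norm_num)))
      · have e2 : ((j : Int)-1).toNat = j - 1 := by omega
        refine Or.inr (Or.inr (Or.inr (Or.inr (Or.inl ?_))))
        rw [eI, e2, hvL (by omega)]
        intro hEq; exact c1 ⟨by omega, hEq⟩
    rw [dfsA_base fuel G1 (i : Int) ((j : Int)-1) [((i : Int), (j : Int))] (pvVal g i j) gl]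
    dsimp only
    by_cases c2 : 0 < i ∧ pvVal g (i-1) j = pvVal g i j
    · refine iff_of_true ?_ (Or.inr (Or.inl c2))
      refine le_trans ?_ (dfsA_mono _ _ _ _ _ _)
      refine le_trans ?_ (dfsA_mono _ _ _ _ _ _)
      exact dfsA_progress fuel G1 ((i : Int)-1) (j : Int) [((i : Int), (j : Int))] (pvVal g i j) (by
        push Not
        have e2 : ((i : Int)-1).toNat = i - 1 := by omega
        refine ⟨by omega, by omega, by omega, by omega, ?_, ?_⟩
        · rw [e2, eJ, hvU c2.1]; exact c2.2
        · rw [e2, eJ, hvU c2.1, c2.2]; exact hv)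
    · have gu : ((i : Int)) - 1 < 0 ∨ ((G1.length : Nat) : Int) ≤ (i : Int) - 1 ∨ (j : Int) < 0 ∨
          (((G1.getD 0 []).length : Nat) : Int) ≤ (j : Int) ∨
          pvVal G1 ((i : Int) - 1).toNat ((j : Int)).toNat ≠ pvVal g i j ∨
          pvVal G1 ((i : Int) - 1).toNat ((j : Int)).toNat = "" := by
        by_cases hi0 : i = 0
        · subst hi0; exact Or.inl (by norm_num)
        · have e2 : ((i : Int)-1).toNat = i - 1 := by omega
          refine Or.inr (Or.inr (Or.inr (Or.inr (Or.inl ?_))))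
          rw [e2, eJ, hvU (by omega)]
          intro hEq; exact c2 ⟨by omega, hEq⟩
      rw [dfsA_base fuel G1 ((i : Int)-1) (j : Int) [((i : Int), (j : Int))] (pvVal g i j) gu]
      dsimp only
      by_cases c3 : j+1 < (g.getD 0 []).length ∧ pvVal g i (j+1) = pvVal g i j
      · refine iff_of_true ?_ (Or.inr (Or.inr (Or.inl c3)))
        refine le_trans ?_ (dfsA_mono _ _ _ _ _ _)
        exact dfsA_progress fuel G1 (i : Int) ((j : Int)+1) [((i : Int), (j : Int))] (pvVal g i j) (by
          push Not
          have e2 : ((j : Int)+1).toNat = j + 1 := by omega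
          have hc3 := c3.1
          refine ⟨by omega, by omega, by omega, by omega, ?_, ?_⟩
          · rw [eI, e2, hvR]; exact c3.2
          · rw [eI, e2, hvR, c3.2]; exact hv)
      · have gr : ((i : Int)) < 0 ∨ ((G1.length : Nat) : Int) ≤ (i : Int) ∨ (j : Int) + 1 < 0 ∨
            (((G1.getD 0 []).length : Nat) : Int) ≤ (j : Int) + 1 ∨
            pvVal G1 ((i : Int)).toNat ((j : Int) + 1).toNat ≠ pvVal g i j ∨
            pvVal G1 ((i : Int)).toNat ((j : Int) + 1).toNat = "" := by
          by_cases hjc : j + 1 < (g.getD 0 []).length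
          · have e2 : ((j : Int)+1).toNat = j + 1 := by omega
            refine Or.inr (Or.inr (Or.inr (Or.inr (Or.inl ?_))))
            rw [eI, e2, hvR]
            intro hEq; exact c3 ⟨hjc, hEq⟩
          · exact Or.inr (Or.inr (Or.inr (Or.inl (by omega))))
        rw [dfsA_base fuel G1 (i : Int) ((j : Int)+1) [((i : Int), (j : Int))] (pvVal g i j) gr]
        dsimp only
        by_cases c4 : i+1 < g.length ∧ pvVal g (i+1) j = pvVal g i j
        · refine iff_of_true ?_ (Or.inr (Or.inr (Or.inr c4)))
          exact dfsA_progress fuel G1 ((i : Int)+1) (j : Int) [((i : Int), (j : Int))] (pvVal g i j) (by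
            push Not
            have e2 : ((i : Int)+1).toNat = i + 1 := by omega
            have hc4 := c4.1
            refine ⟨by omega, by omega, by omega, by omega, ?_, ?_⟩
            · rw [e2, eJ, hvD]; exact c4.2
            · rw [e2, eJ, hvD, c4.2]; exact hv)
        · have gd : ((i : Int)) + 1 < 0 ∨ ((G1.length : Nat) : Int) ≤ (i : Int) + 1 ∨ (j : Int) < 0 ∨
              (((G1.getD 0 []).length : Nat) : Int) ≤ (j : Int) ∨
              pvVal G1 ((i : Int) + 1).toNat ((j : Int)).toNat ≠ pvVal g i j ∨
              pvVal G1 ((i : Int) + 1).toNat ((j : Int)).toNat = "" := by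
            by_cases hic : i + 1 < g.length
            · have e2 : ((i : Int)+1).toNat = i + 1 := by omega
              refine Or.inr (Or.inr (Or.inr (Or.inr (Or.inl ?_))))
              rw [e2, eJ, hvD]
              intro hEq; exact c4 ⟨hic, hEq⟩
            · exact Or.inr (Or.inl (by omega))
          rw [dfsA_base fuel G1 ((i : Int)+1) (j : Int) [((i : Int), (j : Int))] (pvVal g i j) gd]
          dsimp only
          refine iff_of_false (by simp) ?_
          rintro (h | h | h | h)
          · exact c1 h
          · exact c2 h
          · exact c3 h
          · exact c4 h

-- ===== VERDICT (by name: the statement is the Claim_ definition above) =====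
theorem evaluate_possibility_spec : Claim_equal_evaluate_possibility := by
  intro grid _ _
  unfold Spec_evaluate_possibility evaluate_possibility evaluate_possibility_alt
  dsimp only
  refine List.foldl_ext _ _ 0 ?_
  intro acc i hiMem
  refine List.foldl_ext _ _ acc ?_
  intro acc2 j hjMem
  have hi : i < grid.length := List.mem_range.mp hiMem
  have hj : j < (grid.getD 0 []).length := List.mem_range.mp hjMem
  by_cases hval : pvVal grid i j = ""
  · rw [if_neg (by simpa using hval), if_pos hval]
  · rw [if_pos hval, if_neg hval]
    exact if_congr (dfsA_ge_two_iff (grid.length * (grid.getD 0 []).length) grid i j hi hj hval)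
      rfl rfl
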